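-- pv_equiv track=rewrite | github.com/Nellia-dev/Prosp | prospect/ai_prospect_intelligence.py | _predict_purchase_timeline
-- ===== SOURCE A (Python) =====
-- from typing import Dict, Any, List, Optional, Tuple
-- from typing import Dict, Any, List, Optional, Tuple # Ensure Optional is imported
--
-- def _predict_purchase_timeline(detected_signals: List[Dict[str, Any]]) -> str:
--     """Predict most likely purchase timeline"""
--     if not detected_signals:
--         return 'unknown'
--
--     # Find most immediate signal
--     timeframes = [signal['timeframe'] for signal in detected_signals]
--
--     if 'immediate' in timeframes:
--         return 'immediate'
--     elif '1-3 months' in timeframes: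
--         return '1-3 months'
--     elif '3-6 months' in timeframes:
--         return '3-6 months'
--     else:
--         return '6-12 months'
-- ===== SOURCE B (Python) =====
-- def _predict_purchase_timeline(detected_signals):
--     """Predict most likely purchase timeline"""
--     if not detected_signals:
--         return 'unknown'
--     rank = {'immediate': 0, '1-3 months': 1, '3-6 months': 2}
--     labels = ('immediate', '1-3 months', '3-6 months', '6-12 months')
--     best = 3
--     for sig in detected_signals:
--         best = min(best, rank.get(sig['timeframe'], 3))
--     return labels[best]
-- ===== Notes on version B (the rewrite author's own statement) =====
-- stated objective: simpler
-- what changed: Replaces building the full timeframe list plus four sequential membership scans with a single pass that tracks the minimum priority rank via a priority map, then returns the label for that rank.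
import Mathlib
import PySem

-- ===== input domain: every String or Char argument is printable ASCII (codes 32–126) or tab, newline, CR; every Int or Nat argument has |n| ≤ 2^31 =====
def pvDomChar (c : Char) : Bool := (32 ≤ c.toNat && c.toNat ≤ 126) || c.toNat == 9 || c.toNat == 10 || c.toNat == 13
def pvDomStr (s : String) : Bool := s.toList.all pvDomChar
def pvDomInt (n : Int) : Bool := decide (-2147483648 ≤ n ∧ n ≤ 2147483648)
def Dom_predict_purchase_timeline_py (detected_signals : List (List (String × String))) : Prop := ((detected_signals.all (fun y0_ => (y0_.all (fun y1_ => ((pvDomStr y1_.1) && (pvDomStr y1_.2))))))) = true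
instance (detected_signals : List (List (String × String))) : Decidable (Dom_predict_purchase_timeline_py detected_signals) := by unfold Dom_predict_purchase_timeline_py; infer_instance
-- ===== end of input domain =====

-- B replaces A's full timeframe list + four membership scans by one pass tracking the minimum
-- priority rank over a priority map (objective: simpler).

-- ===== PORT A =====
-- signal['timeframe'] (KeyError = none; excluded by Pre_)
def pvTf (s : List (String × String)) : Option String :=
  PySem.Dict.get? (PySem.Dict.ofList s) "timeframe"

-- [signal['timeframe'] for signal in detected_signals]  (none if any lookup raises)
def pvTfList : List (List (String × String)) → Option (List String)
  | [] => some []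
  | s :: rest =>
    match pvTf s with
    | none => none
    | some tf => (pvTfList rest).map (tf :: ·)

def predict_purchase_timeline_py (detected_signals : List (List (String × String))) : String :=
  if detected_signals = [] then "unknown"
  else
    match pvTfList detected_signals with
    | none => "unknown"   -- KeyError in Python; excluded by Pre_
    | some timeframes =>
      if timeframes.contains "immediate" then "immediate"
      else if timeframes.contains "1-3 months" then "1-3 months"
      else if timeframes.contains "3-6 months" then "3-6 months"
      else "6-12 months"

-- ===== PORT B =====
def pvRankMap : PySem.Dict String Nat :=
  PySem.Dict.ofList [("immediate", 0), ("1-3 months", 1), ("3-6 months", 2)]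

def pvLabels : List String := ["immediate", "1-3 months", "3-6 months", "6-12 months"]

-- the single pass: best = min(best, rank.get(signal['timeframe'], 3)); none = KeyError
def pvBestLoop : List (List (String × String)) → Nat → Option Nat
  | [], best => some best
  | s :: rest, best =>
    match pvTf s with
    | none => none
    | some tf => pvBestLoop rest (min best (PySem.Dict.getD pvRankMap tf 3))

def predict_purchase_timeline_py_alt (detected_signals : List (List (String × String))) : String :=
  if detected_signals = [] then "unknown"
  else
    match pvBestLoop detected_signals 3 with
    | none => "unknown"   -- KeyError in Python; excluded by Pre_
    | some best => pvLabels.getD best ""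

-- ===== PRECONDITION & SPEC =====
-- Pre_ excludes exactly the inputs where Python (both A and B) raises KeyError:
-- some signal dict has no 'timeframe' key.
def Pre_predict_purchase_timeline_py (detected_signals : List (List (String × String))) : Prop :=
  ∀ s ∈ detected_signals, (pvTf s).isSome
instance (detected_signals : List (List (String × String))) : Decidable (Pre_predict_purchase_timeline_py detected_signals) := by unfold Pre_predict_purchase_timeline_py; infer_instance

def pvWitness_predict_purchase_timeline_py : (List (List (String × String))) :=
  [[("timeframe", "3-6 months")], [("timeframe", "soon")]]

def Spec_predict_purchase_timeline_py (detected_signals : List (List (String × String))) (out : String) : Prop := out = predict_purchase_timeline_py_alt detected_signals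
instance (detected_signals : List (List (String × String))) (out : String) : Decidable (Spec_predict_purchase_timeline_py detected_signals out) := by unfold Spec_predict_purchase_timeline_py; infer_instance

-- ===== CLAIM (what is proved, stated in full; the proofs are below) =====
def Claim_equal_predict_purchase_timeline_py : Prop := ∀ (detected_signals : List (List (String × String))), Dom_predict_purchase_timeline_py detected_signals → Pre_predict_purchase_timeline_py detected_signals → Spec_predict_purchase_timeline_py detected_signals (predict_purchase_timeline_py detected_signals)

-- ===== LEMMAS AND PROOFS =====

def pvRank (tf : String) : Nat := PySem.Dict.getD pvRankMap tf 3

lemma pvRank_eq (tf : String) :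
    pvRank tf = if tf = "immediate" then 0 else if tf = "1-3 months" then 1
      else if tf = "3-6 months" then 2 else 3 := by
  have hmk : pvRankMap = PySem.Dict.mk [("immediate", (0:Nat)), ("1-3 months", 1), ("3-6 months", 2)] := by decide
  unfold pvRank
  split_ifs with h1 h2 h3 <;> subst_vars <;> try decide
  simp [hmk, PySem.Dict.getD, PySem.Dict.get?,
    Ne.symm h1, Ne.symm h2, Ne.symm h3]

-- under Pre_, the comprehension succeeds
lemma pvTfList_isSome {ds : List (List (String × String))}
    (h : ∀ s ∈ ds, (pvTf s).isSome) : (pvTfList ds).isSome := by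
  induction ds with
  | nil => simp [pvTfList]
  | cons s rest ih =>
    have hs := h s (by simp)
    have hr := ih (fun x hx => h x (by simp [hx]))
    cases hh : pvTf s with
    | none => simp [hh] at hs
    | some tf =>
      cases hr' : pvTfList rest with
      | none => simp [hr'] at hr
      | some tfs => simp [pvTfList, hh, hr']

-- the single pass computes the fold of min∘rank over the timeframe list
lemma pvBestLoop_eq {ds : List (List (String × String))} {tfs : List String}
    (h : pvTfList ds = some tfs) (b : Nat) :
    pvBestLoop ds b = some (tfs.foldl (fun acc tf => min acc (pvRank tf)) b) := by
  induction ds generalizing tfs b with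
  | nil => simp [pvTfList] at h; subst h; simp [pvBestLoop]
  | cons s rest ih =>
    simp only [pvTfList] at h
    cases hh : pvTf s with
    | none => simp [hh] at h
    | some tf =>
      simp only [hh] at h
      cases hr : pvTfList rest with
      | none => simp [hr] at h
      | some tfs' =>
        simp only [hr, Option.map_some] at h
        cases h
        simp [pvBestLoop, hh, ih hr, pvRank]

lemma foldl_min_le_init (tfs : List String) (b : Nat) :
    tfs.foldl (fun acc tf => min acc (pvRank tf)) b ≤ b := by
  induction tfs generalizing b with
  | nil => simp
  | cons t ts ih => exact le_trans (ih _) (min_le_left _ _)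

lemma foldl_min_le_mem {tfs : List String} {tf : String} (h : tf ∈ tfs) (b : Nat) :
    tfs.foldl (fun acc t => min acc (pvRank t)) b ≤ pvRank tf := by
  induction tfs generalizing b with
  | nil => simp at h
  | cons t ts ih =>
    simp only [List.foldl_cons]
    rcases List.mem_cons.mp h with rfl | h'
    · exact le_trans (foldl_min_le_init _ _) (min_le_right _ _)
    · exact ih h' _

lemma foldl_min_cases (tfs : List String) (b : Nat) :
    tfs.foldl (fun acc t => min acc (pvRank t)) b = b ∨
      ∃ tf ∈ tfs, tfs.foldl (fun acc t => min acc (pvRank t)) b = pvRank tf := by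
  induction tfs generalizing b with
  | nil => left; rfl
  | cons t ts ih =>
    simp only [List.foldl_cons]
    rcases le_total b (pvRank t) with hle | hle
    · rw [min_eq_left hle]
      rcases ih b with h | ⟨tf, htf, h⟩
      · left; exact h
      · right; exact ⟨tf, by simp [htf], h⟩
    · rw [min_eq_right hle]
      rcases ih (pvRank t) with h | ⟨tf, htf, h⟩
      · right; exact ⟨t, by simp, h⟩
      · right; exact ⟨tf, by simp [htf], h⟩

lemma chain_eq_label (tfs : List String) :
    (if tfs.contains "immediate" then "immediate"
     else if tfs.contains "1-3 months" then "1-3 months"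
     else if tfs.contains "3-6 months" then "3-6 months"
     else "6-12 months")
    = pvLabels.getD (tfs.foldl (fun acc tf => min acc (pvRank tf)) 3) "" := by
  set m := tfs.foldl (fun acc tf => min acc (pvRank tf)) 3 with hm
  have hmle : m ≤ 3 := foldl_min_le_init tfs 3
  by_cases h0 : "immediate" ∈ tfs
  · have : m ≤ pvRank "immediate" := foldl_min_le_mem h0 3
    rw [pvRank_eq] at this
    simp at this
    simp [h0, this, pvLabels]
  · have hm0 : m ≠ 0 := by
      intro hz
      rcases foldl_min_cases tfs 3 with h | ⟨tf, htf, h⟩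
      · omega
      · rw [pvRank_eq] at h
        split_ifs at h with h1 h2 h3 <;> subst_vars <;> first | exact h0 htf | omega
    by_cases h1 : "1-3 months" ∈ tfs
    · have : m ≤ pvRank "1-3 months" := foldl_min_le_mem h1 3
      rw [pvRank_eq] at this; simp at this
      have : m = 1 := by omega
      simp [h0, h1, this, pvLabels]
    · have hm1 : m ≠ 1 := by
        intro hz
        rcases foldl_min_cases tfs 3 with h | ⟨tf, htf, h⟩
        · omega
        · rw [pvRank_eq] at h
          split_ifs at h with ha hb hc <;> subst_vars <;>
            first | exact h0 htf | exact h1 htf | omega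
      by_cases h2 : "3-6 months" ∈ tfs
      · have : m ≤ pvRank "3-6 months" := foldl_min_le_mem h2 3
        rw [pvRank_eq] at this; simp at this
        have : m = 2 := by omega
        simp [h0, h1, h2, this, pvLabels]
      · have hm2 : m ≠ 2 := by
          intro hz
          rcases foldl_min_cases tfs 3 with h | ⟨tf, htf, h⟩
          · omega
          · rw [pvRank_eq] at h
            split_ifs at h with ha hb hc <;> subst_vars <;>
              first | exact h0 htf | exact h1 htf | exact h2 htf | omega
        have : m = 3 := by omega
        simp [h0, h1, h2, this, pvLabels]

-- ===== VERDICT (by name: the statement is the Claim_ definition above) =====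
theorem predict_purchase_timeline_py_spec : Claim_equal_predict_purchase_timeline_py := by
  intro ds _ hpre
  unfold Spec_predict_purchase_timeline_py predict_purchase_timeline_py predict_purchase_timeline_py_alt
  by_cases hds : ds = []
  · simp [hds]
  · simp only [hds, if_false]
    have hsome := pvTfList_isSome hpre
    cases htl : pvTfList ds with
    | none => simp [htl] at hsome
    | some tfs =>
      rw [pvBestLoop_eq htl 3]
      simpa using chain_eq_label tfs
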